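-- pv_equiv track=rewrite | github.com/swin16/Biostatistics | classification.py | delete_lines
-- ===== SOURCE A (Python) =====
-- def delete_lines(lines):
--     i = 1
--     x = []
--     for line in lines:
--         if i%2 == 0:
--             x.append(line)
--         i += 1
--     return x
-- ===== SOURCE B (Python) =====
-- def delete_lines(lines):
--     # One closed-form slice: keep the elements at odd 0-based indices.
--     return list(lines[1::2])
-- ===== Notes on version B (the rewrite author's own statement) =====
-- stated objective: simpler
-- what changed: Replaced the explicit counter/loop/modulo-append with a single closed-form slice lines[1::2] selecting the odd 0-based indices.
import Mathlib
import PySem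

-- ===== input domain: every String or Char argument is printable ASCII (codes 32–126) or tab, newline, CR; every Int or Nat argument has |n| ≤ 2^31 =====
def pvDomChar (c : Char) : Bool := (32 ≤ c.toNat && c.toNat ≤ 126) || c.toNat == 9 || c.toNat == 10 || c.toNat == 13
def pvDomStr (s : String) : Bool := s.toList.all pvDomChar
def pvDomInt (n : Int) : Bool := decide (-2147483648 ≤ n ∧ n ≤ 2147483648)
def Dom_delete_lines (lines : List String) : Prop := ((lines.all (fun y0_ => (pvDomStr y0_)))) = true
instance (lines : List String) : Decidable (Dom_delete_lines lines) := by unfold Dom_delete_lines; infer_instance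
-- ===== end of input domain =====

-- B replaces A's counter/loop/modulo-append with one closed-form slice lines[1::2] (simpler).


-- ===== PORT A =====
-- i = 1; x = []; for line in lines: if i%2 == 0: x.append(line); i += 1; return x
def delete_lines (lines : List String) : List String :=
  (lines.foldl
    (fun (st : Int × List String) line =>
      (st.1 + 1, if PySem.Int.mod st.1 2 = 0 then st.2 ++ [line] else st.2))
    (1, [])).2

-- ===== PORT B =====
-- return list(lines[1::2])
def delete_lines_alt (lines : List String) : List String :=
  (PySem.List.slice? lines (some 1) none 2).getD []

-- ===== PRECONDITION & SPEC =====
def Spec_delete_lines (lines : List String) (out : List String) : Prop := out = delete_lines_alt lines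
instance (lines : List String) (out : List String) : Decidable (Spec_delete_lines lines out) := by unfold Spec_delete_lines; infer_instance

-- ===== CLAIM (what is proved, stated in full; the proofs are below) =====
def Claim_equal_delete_lines : Prop := ∀ (lines : List String), Dom_delete_lines lines → Spec_delete_lines lines (delete_lines lines)

-- ===== LEMMAS AND PROOFS =====

-- elements at odd 0-based indices / at even 0-based indices (common spec)
mutual
def oddIdx {α : Type} : List α → List α
  | [] => []
  | _ :: t => evenIdx t
def evenIdx {α : Type} : List α → List α
  | [] => []
  | a :: t => a :: oddIdx t
end

-- PySem.Int.mod with divisor 2 is Lean's emod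
theorem pvMod2 (i : Int) : PySem.Int.mod i 2 = i % 2 := by
  simp [PySem.Int.mod, Int.fmod_eq_emod_of_nonneg]

-- A's fold appends exactly the odd-indexed (i even, i = index+1) elements
theorem foldA_spec (t : List String) : ∀ (acc : List String) (i : Int),
    (i % 2 ≠ 0 →
      (t.foldl (fun (st : Int × List String) line =>
        (st.1 + 1, if PySem.Int.mod st.1 2 = 0 then st.2 ++ [line] else st.2)) (i, acc)).2
      = acc ++ oddIdx t) ∧
    (i % 2 = 0 →
      (t.foldl (fun (st : Int × List String) line =>
        (st.1 + 1, if PySem.Int.mod st.1 2 = 0 then st.2 ++ [line] else st.2)) (i, acc)).2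
      = acc ++ evenIdx t) := by
  induction t with
  | nil => intro acc i; simp [oddIdx, evenIdx]
  | cons a t ih =>
    intro acc i
    constructor
    · intro h
      simp only [List.foldl]
      rw [pvMod2, if_neg h]
      exact ((ih acc (i + 1)).2 (by omega)).trans (by rw [oddIdx])
    · intro h
      simp only [List.foldl]
      rw [pvMod2, if_pos h]
      rw [(ih (acc ++ [a]) (i + 1)).1 (by omega)]
      simp [evenIdx]
    
-- the odd-index filterMap over a range equals oddIdx
theorem filterMap_odd {α : Type} (xs : List α) :
    (List.range (xs.length / 2)).filterMap (fun k => xs[1 + 2 * k]?) = oddIdx xs := by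
  match xs with
  | [] => simp [oddIdx]
  | [a] => simp [oddIdx, evenIdx]
  | a :: b :: t =>
    have hlen : (a :: b :: t).length / 2 = t.length / 2 + 1 := by
      simp [List.length_cons]; omega
    rw [hlen, List.range_succ_eq_map, List.filterMap_cons, List.filterMap_map]
    have : ((fun k => (a :: b :: t)[1 + 2 * k]?) ∘ Nat.succ)
         = (fun k => t[1 + 2 * k]?) := by
      funext k
      show (a :: b :: t)[1 + 2 * (k + 1)]? = t[1 + 2 * k]?
      have : 1 + 2 * (k + 1) = (1 + 2 * k) + 1 + 1 := by omega
      rw [this, List.getElem?_cons_succ, List.getElem?_cons_succ]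
    rw [this, filterMap_odd t]
    simp [oddIdx, evenIdx]

-- B's slice computes oddIdx
theorem sliceB_spec (xs : List String) :
    (PySem.List.slice? xs (some 1) none 2).getD [] = oddIdx xs := by
  rw [← filterMap_odd xs]
  simp only [PySem.List.slice?, PySem.List.sliceIndices]
  norm_num
  rcases Nat.lt_or_ge xs.length 2 with h | h
  · rw [if_neg (by omega)]
    have : xs.length / 2 = 0 := by omega
    simp [this]
  · rw [if_pos (by omega)]
    have hmin : min 1 (xs.length:Int) = 1 := by omega
    rw [hmin]
    have hcount : (((xs.length:Int) - 1 + 2 - 1) / 2).toNat = xs.length / 2 := by omega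
    rw [hcount]
    apply List.filterMap_congr
    intro k _
    congr 1

-- ===== VERDICT (by name: the statement is the Claim_ definition above) =====
theorem delete_lines_spec : Claim_equal_delete_lines := by
  intro lines _
  unfold Spec_delete_lines delete_lines delete_lines_alt
  rw [sliceB_spec]
  exact (foldA_spec lines [] 1).1 (by omega) |>.trans (by simp)
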